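-- pv_equiv track=rewrite | github.com/seopchan/CodingTest | 백준/Silver/1706. 크로스워드/크로스워드.py | getWordsInLine
-- ===== SOURCE A (Python) =====
-- def getWordsInLine(line):
--     words = []
--     word = []
--     for c in line:
--         if c != '#':
--             word.append(c)
--         else:
--             if len(word) > 0:
--                 if len(word) > 1:
--                     words.append(''.join(word))
--                 word.clear()
--     if len(word) > 1:
--             words.append(''.join(word))
--     return words
-- ===== SOURCE B (Python) =====
-- def getWordsInLine(line):
--     return [w for w in line.split('#') if len(w) > 1]
-- ===== Notes on version B (the rewrite author's own statement) =====
-- stated objective: simpler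
-- what changed: Replaces the character-by-character loop with a mutable word buffer and flush-on-delimiter logic by a single str.split call on the delimiter followed by a length filter over the token list.
import Mathlib
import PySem

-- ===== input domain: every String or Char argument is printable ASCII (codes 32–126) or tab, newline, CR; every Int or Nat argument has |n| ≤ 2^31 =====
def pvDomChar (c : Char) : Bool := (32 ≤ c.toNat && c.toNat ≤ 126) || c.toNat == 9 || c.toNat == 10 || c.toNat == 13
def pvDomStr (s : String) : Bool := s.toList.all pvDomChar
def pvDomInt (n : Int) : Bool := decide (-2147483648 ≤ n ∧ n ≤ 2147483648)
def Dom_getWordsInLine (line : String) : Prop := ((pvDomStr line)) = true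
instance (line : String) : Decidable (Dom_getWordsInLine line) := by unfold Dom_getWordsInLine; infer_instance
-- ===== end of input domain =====

-- B replaces A's char-by-char buffer loop by split-on-delimiter + length filter (simpler; timed faster by the check).
-- ===== PORT A =====
-- literal transliteration of A: fold over the characters with (words, word) state;
-- ''.join(word) for a list of chars is String.ofList word (exact on this domain)
def getWordsInLineGo : List Char → List String → List Char → List String
  | [], words, word =>
      if 1 < word.length then words ++ [String.ofList word] else words
  | c :: rest, words, word =>
      if c ≠ '#' then
        getWordsInLineGo rest words (word ++ [c])
      else
        if 0 < word.length then
          if 1 < word.length then getWordsInLineGo rest (words ++ [String.ofList word]) []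
          else getWordsInLineGo rest words []
        else
          getWordsInLineGo rest words word

def getWordsInLine (line : String) : List String :=
  getWordsInLineGo line.toList [] []

-- ===== PORT B =====
-- B: line.split('#') then keep the tokens of length > 1
def getWordsInLine_alt (line : String) : List String :=
  match PySem.Str.split? line "#" with
  | some parts => parts.filter (fun w => 1 < PySem.Str.len w)
  | none => []

-- ===== PRECONDITION & SPEC =====
def Spec_getWordsInLine (line : String) (out : List String) : Prop := out = getWordsInLine_alt line
instance (line : String) (out : List String) : Decidable (Spec_getWordsInLine line out) := by unfold Spec_getWordsInLine; infer_instance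

-- ===== CLAIM (what is proved, stated in full; the proofs are below) =====
def Claim_equal_getWordsInLine : Prop := ∀ (line : String), Dom_getWordsInLine line → Spec_getWordsInLine line (getWordsInLine line)

-- ===== LEMMAS AND PROOFS =====

-- specification of split on a single '#': structural recursion over the characters
def spHash : List Char → List (List Char)
  | [] => [[]]
  | c :: rest =>
      if c = '#' then [] :: spHash rest
      else
        match spHash rest with
        | h :: t => (c :: h) :: t
        | [] => [[c]]

theorem spHash_ne_nil (l : List Char) : spHash l ≠ [] := by
  cases l with
  | nil => simp [spHash]
  | cons c rest =>
      simp only [spHash]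
      split_ifs
      · simp
      · cases h : spHash rest <;> simp

theorem splitOn_go_eq (fuel : Nat) (l cur : List Char) (acc : List (List Char))
    (hf : l.length ≤ fuel) :
    PySem.Chars.splitOn.go ['#'] fuel l cur acc =
      acc.reverse ++ (match spHash l with
        | h :: t => (cur.reverse ++ h) :: t
        | [] => [cur.reverse]) := by
  induction fuel generalizing l cur acc with
  | zero =>
      have : l = [] := List.length_eq_zero_iff.mp (Nat.le_zero.mp hf)
      subst this
      simp [PySem.Chars.splitOn.go, spHash]
  | succ f ih =>
      cases l with
      | nil => simp [PySem.Chars.splitOn.go, spHash]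
      | cons c rest =>
          simp only [PySem.Chars.splitOn.go]
          by_cases hc : c = '#'
          · subst hc
            have hpre : ['#'].isPrefixOf ('#' :: rest) = true := by
              simp [List.isPrefixOf]
            rw [if_pos hpre]
            simp only [List.length_cons, List.length_nil, Nat.zero_add, List.drop_succ_cons,
              List.drop_zero]
            rw [ih rest [] (cur.reverse :: acc) (by simpa using Nat.le_of_succ_le_succ hf)]
            have hne := spHash_ne_nil rest
            cases hsp : spHash rest with
            | nil => exact absurd hsp hne
            | cons h t => simp [spHash, hsp]
          · have hpre : ¬ (['#'].isPrefixOf (c :: rest) = true) := by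
              simp only [List.isPrefixOf, Bool.and_eq_true, beq_iff_eq, and_true]
              exact fun h => hc h.symm
            rw [if_neg hpre]
            rw [ih rest (c :: cur) acc (by simpa using Nat.le_of_succ_le_succ hf)]
            have hne := spHash_ne_nil rest
            cases hsp : spHash rest with
            | nil => exact absurd hsp hne
            | cons h t => simp [spHash, hsp, hc]

theorem splitOn_eq_spHash (s : List Char) :
    PySem.Chars.splitOn s ['#'] = spHash s := by
  show PySem.Chars.splitOn.go ['#'] (s.length + 1) s [] [] = spHash s
  rw [splitOn_go_eq (s.length + 1) s [] [] (Nat.le_succ _)]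
  have hne := spHash_ne_nil s
  cases hsp : spHash s with
  | nil => exact absurd hsp hne
  | cons h t => simp

theorem go_eq_filter (l : List Char) (word : List Char) (words : List String) :
    getWordsInLineGo l words word =
      words ++ ((match spHash l with
        | h :: t => (word ++ h) :: t
        | [] => [word]).filter (fun w : List Char => 1 < w.length)).map String.ofList := by
  induction l generalizing word words with
  | nil =>
      simp only [getWordsInLineGo, spHash]
      by_cases hw : 1 < word.length <;> simp [List.filter, hw]
  | cons c rest ih =>
      simp only [getWordsInLineGo]
      have hne := spHash_ne_nil rest
      by_cases hc : c = '#'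
      · subst hc
        rw [if_neg (by simp)]
        by_cases h0 : 0 < word.length
        · rw [if_pos h0]
          by_cases h1 : 1 < word.length
          · rw [if_pos h1, ih]
            cases hsp : spHash rest with
            | nil => exact absurd hsp hne
            | cons h t => simp [spHash, hsp, List.filter, decide_eq_true h1]; try rfl
          · rw [if_neg h1, ih]
            cases hsp : spHash rest with
            | nil => exact absurd hsp hne
            | cons h t => simp [spHash, hsp, List.filter, h1]; try rfl
        · rw [if_neg h0]
          have hword : word = [] := List.length_eq_zero_iff.mp (Nat.le_zero.mp (Nat.not_lt.mp h0))
          subst hword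
          rw [ih]
          cases hsp : spHash rest with
          | nil => exact absurd hsp hne
          | cons h t => simp [spHash, hsp, List.filter]; try rfl
      · rw [if_pos (by simp [hc])]
        rw [ih]
        cases hsp : spHash rest with
        | nil => exact absurd hsp hne
        | cons h t =>
            simp only [spHash, if_neg hc, hsp]
            rw [List.append_assoc]
            rfl


-- ===== VERDICT (by name: the statement is the Claim_ definition above) =====
theorem getWordsInLine_spec : Claim_equal_getWordsInLine := by
  intro line _
  show getWordsInLine line = getWordsInLine_alt line
  unfold getWordsInLine getWordsInLine_alt
  rw [go_eq_filter]
  have hsplit : PySem.Str.split? line "#" =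
      some ((spHash line.toList).map String.ofList) := by
    unfold PySem.Str.split? PySem.Chars.split?
    rw [show ("#" : String).toList = ['#'] from rfl, splitOn_eq_spHash]
    simp
  rw [hsplit]
  have hne := spHash_ne_nil line.toList
  cases hsp : spHash line.toList with
  | nil => exact absurd hsp hne
  | cons h t =>
      simp only [List.nil_append]
      rw [List.filter_map]
      congr 1
      apply List.filter_congr
      intro w _
      simp [PySem.Str.len, Function.comp]
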